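-- pv_equiv track=rewrite | github.com/karthikuwc/firstprojects | Data_Compression/adhuff.py | calcweights
-- ===== SOURCE A (Python) =====
-- def calcweights(xt):
--     weights = []
--     for i in range(len(xt)):
--         if len(xt[i][1]) == 0:
--             weights.append(1)
--         else:
--             weights.append(weights[xt[i][1][0]] + weights[xt[i][1][1]])
--     return weights
-- ===== SOURCE B (Python) =====
-- def calcweights(xt):
--     memo = {}
--
--     def weight(i):
--         if i in memo:
--             return memo[i]
--         children = xt[i][1]
--         if len(children) == 0:
--             r = 1
--         else:
--             r = weight(children[0]) + weight(children[1])
--         memo[i] = r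
--         return r
--
--     return [weight(i) for i in range(len(xt))]
-- ===== Notes on version B (the rewrite author's own statement) =====
-- stated objective: alternative
-- what changed: Replaces A's single forward scan that indexes into the growing weights output list with a memoized recursive weight(i) over the tree structure collected by a comprehension; Pre_ excludes the inputs where A raises IndexError (forward/out-of-range child references, one-element child lists) and the inputs with negative child references, where A's value is an accident of negative-indexing into the partially-built weights list and the natural recursion instead follows Python's negative indexing into the full node array (and does not terminate).
-- outside the precondition, e.g. on calcweights([(0, []), (0, [-1, -1])]): A returns [1, 2], B raises RecursionError
import Mathlib
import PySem

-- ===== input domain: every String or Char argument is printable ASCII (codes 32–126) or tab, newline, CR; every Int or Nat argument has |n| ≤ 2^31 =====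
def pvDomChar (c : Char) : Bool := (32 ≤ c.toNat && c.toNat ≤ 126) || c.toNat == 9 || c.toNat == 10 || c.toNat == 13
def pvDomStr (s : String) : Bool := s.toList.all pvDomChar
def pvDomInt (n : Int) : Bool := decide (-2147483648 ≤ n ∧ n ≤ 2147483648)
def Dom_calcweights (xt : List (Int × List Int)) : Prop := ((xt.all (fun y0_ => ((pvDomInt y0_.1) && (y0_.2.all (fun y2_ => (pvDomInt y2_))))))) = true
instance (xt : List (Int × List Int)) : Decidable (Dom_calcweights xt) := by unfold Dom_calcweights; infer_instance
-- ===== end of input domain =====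

-- B computes the weights by a memoized recursion over the tree structure instead of A's
-- forward scan indexing into the growing output list; equal return values on Pre_
-- (alternative decomposition, same cost).

-- ===== PORT A =====
-- A: weights = []; for i in range(len(xt)): append 1 for a leaf, else weights[c0] + weights[c1].
-- xt[i] is always in range; the weights[...] lookups use pyGetD with default 0, which is only
-- reached outside Pre_ (Python raises IndexError exactly there).
def calcweights (xt : List (Int × List Int)) : List Int :=
  (List.range xt.length).foldl (fun weights i =>
    let cs := (PySem.List.pyGetD xt (Int.ofNat i) (0, [])).2
    if cs.length = 0 then weights ++ [1]
    else weights ++ [PySem.List.pyGetD weights (PySem.List.pyGetD cs 0 0) 0 +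
                     PySem.List.pyGetD weights (PySem.List.pyGetD cs 1 0) 0]) []

-- ===== PORT B =====
-- B's recursive weight(i) with the memo dict threaded through; fuel is only a totality
-- device (Python's recursion has no fuel); under Pre_ the 0-fuel/default branches are never hit.
def wstep (xt : List (Int × List Int)) (fuel : Nat) (i : Int) (memo : PySem.Dict Int Int) :
    Int × PySem.Dict Int Int :=
  match PySem.Dict.get? memo i with
  | some v => (v, memo)
  | none =>
    match fuel with
    | 0 => (0, memo)
    | f + 1 =>
      let cs := (PySem.List.pyGetD xt i (0, [])).2
      if cs.length = 0 then (1, PySem.Dict.insert memo i 1)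
      else
        let p := wstep xt f (PySem.List.pyGetD cs 0 0) memo
        let q := wstep xt f (PySem.List.pyGetD cs 1 0) p.2
        (p.1 + q.1, PySem.Dict.insert q.2 i (p.1 + q.1))
termination_by fuel

-- [weight(i) for i in range(len(xt))], threading the memo left to right
def calcweights_alt (xt : List (Int × List Int)) : List Int :=
  ((List.range xt.length).foldl (fun st i =>
    let p := wstep xt xt.length (Int.ofNat i) st.2
    (st.1 ++ [p.1], p.2)) (([] : List Int), (PySem.Dict.mk []))).1

-- ===== PRECONDITION & SPEC =====
-- Pre_ excludes the inputs where A raises IndexError (a non-leaf node whose child list has fewer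
-- than two entries, or a child index out of range of the weights built so far) and the inputs with
-- negative child references, where A's value is an accident of negative-indexing into the
-- partially-built weights list and B's natural recursion does not terminate.
def Pre_calcweights (xt : List (Int × List Int)) : Prop :=
  ∀ i, i < xt.length →
    (xt.getD i (0, [])).2 = [] ∨
    (2 ≤ (xt.getD i (0, [])).2.length ∧
     0 ≤ (xt.getD i (0, [])).2.getD 0 0 ∧ (xt.getD i (0, [])).2.getD 0 0 < (i : Int) ∧
     0 ≤ (xt.getD i (0, [])).2.getD 1 0 ∧ (xt.getD i (0, [])).2.getD 1 0 < (i : Int))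
instance (xt : List (Int × List Int)) : Decidable (Pre_calcweights xt) := by unfold Pre_calcweights; infer_instance

def pvWitness_calcweights : (List (Int × List Int)) := [(5, []), (3, []), (9, [0, 1]), (2, [2, 1])]

def Spec_calcweights (xt : List (Int × List Int)) (out : List Int) : Prop := out = calcweights_alt xt
instance (xt : List (Int × List Int)) (out : List Int) : Decidable (Spec_calcweights xt out) := by unfold Spec_calcweights; infer_instance

-- ===== CLAIM (what is proved, stated in full; the proofs are below) =====
def Claim_equal_calcweights : Prop := ∀ (xt : List (Int × List Int)), Dom_calcweights xt → Pre_calcweights xt → Spec_calcweights xt (calcweights xt)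

-- ===== LEMMAS AND PROOFS =====

-- the common specification value: pure fuel recursion (no memo); W xt i = weight of node i
def Wf (xt : List (Int × List Int)) : Nat → Int → Int
  | 0, _ => 0
  | f + 1, i =>
    let cs := (PySem.List.pyGetD xt i (0, [])).2
    if cs.length = 0 then 1
    else Wf xt f (PySem.List.pyGetD cs 0 0) + Wf xt f (PySem.List.pyGetD cs 1 0)

def W (xt : List (Int × List Int)) (i : Nat) : Int := Wf xt (i + 1) (i : Int)

theorem Wf_node (xt : List (Int × List Int)) (f : Nat) (i : Int)
    (h : ¬ (PySem.List.pyGetD xt i (0, [])).2.length = 0) :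
    Wf xt (f + 1) i =
      Wf xt f (PySem.List.pyGetD (PySem.List.pyGetD xt i (0, [])).2 0 0) +
      Wf xt f (PySem.List.pyGetD (PySem.List.pyGetD xt i (0, [])).2 1 0) := by
  conv_lhs => rw [Wf]
  simp only [h, if_false]

theorem Wf_leaf (xt : List (Int × List Int)) (f : Nat) (i : Int)
    (h : (PySem.List.pyGetD xt i (0, [])).2.length = 0) :
    Wf xt (f + 1) i = 1 := by
  conv_lhs => rw [Wf]
  simp only [h, if_true]

theorem pyGetD_int_nat (xt : List (Int × List Int)) (i : Nat) :
    (PySem.List.pyGetD xt (i : Int) (0, [])).2 = (xt.getD i (0, [])).2 := by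
  simp [PySem.List.pyGetD_natCast]

theorem pyGetD_cs01 (cs : List Int) :
    PySem.List.pyGetD cs 0 0 = cs.getD 0 0 ∧ PySem.List.pyGetD cs 1 0 = cs.getD 1 0 := by
  constructor
  · exact PySem.List.pyGetD_zero cs 0
  · rw [show ((1 : Int)) = ((1 : Nat) : Int) by rfl, PySem.List.pyGetD_natCast]

theorem fuel_irrel (xt : List (Int × List Int)) (hP : Pre_calcweights xt) :
    ∀ i : Nat, i < xt.length → ∀ f : Nat, i < f → Wf xt f (i : Int) = W xt i := by
  intro i
  induction i using Nat.strong_induction_on with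
  | _ i IH =>
    intro hi f hf
    obtain ⟨g, rfl⟩ : ∃ g, f = g + 1 := ⟨f - 1, by omega⟩
    have hxt := pyGetD_int_nat xt i
    rcases hP i hi with hleaf | ⟨hlen, h0a, h0b, h1a, h1b⟩
    · rw [Wf_leaf xt g _ (by rw [hxt, hleaf]; rfl)]
      rw [W, Wf_leaf xt i _ (by rw [hxt, hleaf]; rfl)]
    · have hne : ¬ (PySem.List.pyGetD xt (i : Int) (0, [])).2.length = 0 := by
        rw [hxt]; omega
      have hc0 : PySem.List.pyGetD (PySem.List.pyGetD xt (i : Int) (0, [])).2 0 0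
          = (xt.getD i (0, [])).2.getD 0 0 := by rw [hxt]; exact (pyGetD_cs01 _).1
      have hc1 : PySem.List.pyGetD (PySem.List.pyGetD xt (i : Int) (0, [])).2 1 0
          = (xt.getD i (0, [])).2.getD 1 0 := by rw [hxt]; exact (pyGetD_cs01 _).2
      set r0 := (xt.getD i (0, [])).2.getD 0 0 with hr0
      set r1 := (xt.getD i (0, [])).2.getD 1 0 with hr1
      have e0 : r0 = ((r0.toNat : Nat) : Int) := by omega
      have e1 : r1 = ((r1.toNat : Nat) : Int) := by omega
      rw [Wf_node xt g _ hne, W, Wf_node xt i _ hne, hc0, hc1]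
      have A0 : Wf xt g r0 = W xt r0.toNat := by
        have h := IH r0.toNat (by omega) (by omega) g (by omega); rwa [← e0] at h
      have A1 : Wf xt g r1 = W xt r1.toNat := by
        have h := IH r1.toNat (by omega) (by omega) g (by omega); rwa [← e1] at h
      have B0 : Wf xt i r0 = W xt r0.toNat := by
        have h := IH r0.toNat (by omega) (by omega) i (by omega); rwa [← e0] at h
      have B1 : Wf xt i r1 = W xt r1.toNat := by
        have h := IH r1.toNat (by omega) (by omega) i (by omega); rwa [← e1] at h
      rw [A0, A1, B0, B1]

-- W of a non-leaf node is the sum of the W's of its children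
theorem W_eq_children (xt : List (Int × List Int)) (hP : Pre_calcweights xt)
    (k : Nat) (hk : k < xt.length) (hne : ¬ (xt.getD k (0, [])).2.length = 0) :
    W xt k = W xt ((xt.getD k (0, [])).2.getD 0 0).toNat
           + W xt ((xt.getD k (0, [])).2.getD 1 0).toNat := by
  rcases hP k hk with hleaf | ⟨hlen, h0a, h0b, h1a, h1b⟩
  · exact absurd (by rw [hleaf]; rfl) hne
  have hxt := pyGetD_int_nat xt k
  have hne' : ¬ (PySem.List.pyGetD xt (k : Int) (0, [])).2.length = 0 := by rw [hxt]; omega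
  set r0 := (xt.getD k (0, [])).2.getD 0 0 with hr0
  set r1 := (xt.getD k (0, [])).2.getD 1 0 with hr1
  have e0 : r0 = ((r0.toNat : Nat) : Int) := by omega
  have e1 : r1 = ((r1.toNat : Nat) : Int) := by omega
  rw [W, Wf_node xt k _ hne']
  rw [(by rw [hxt]; exact (pyGetD_cs01 _).1 :
        PySem.List.pyGetD (PySem.List.pyGetD xt (k : Int) (0, [])).2 0 0
          = (xt.getD k (0, [])).2.getD 0 0),
      (by rw [hxt]; exact (pyGetD_cs01 _).2 :
        PySem.List.pyGetD (PySem.List.pyGetD xt (k : Int) (0, [])).2 1 0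
          = (xt.getD k (0, [])).2.getD 1 0)]
  have A0 : Wf xt k r0 = W xt r0.toNat := by
    have h := fuel_irrel xt hP r0.toNat (by omega) k (by omega); rwa [← e0] at h
  have A1 : Wf xt k r1 = W xt r1.toNat := by
    have h := fuel_irrel xt hP r1.toNat (by omega) k (by omega); rwa [← e1] at h
  rw [A0, A1]

-- the memo after k calls of B: {0: W 0, 1: W 1, …, k-1: W (k-1)} in order
def mkMemo (xt : List (Int × List Int)) (k : Nat) : PySem.Dict Int Int :=
  PySem.Dict.mk ((List.range k).map (fun (j : Nat) => ((j : Int), W xt j)))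

theorem find?_mkMemo (xt : List (Int × List Int)) (k : Nat) (x : Int) :
    List.find? (fun p => p.1 == x) ((List.range k).map (fun (j : Nat) => ((j : Int), W xt j)))
      = if 0 ≤ x ∧ x < (k : Int) then some (x, W xt x.toNat) else none := by
  induction k with
  | zero =>
    rw [if_neg (by omega)]
    simp
  | succ k ih =>
    rw [List.range_succ, List.map_append, List.find?_append, ih]
    by_cases hx : 0 ≤ x ∧ x < (k : Int)
    · rw [if_pos hx, if_pos ⟨hx.1, by omega⟩]; rfl
    · rw [if_neg hx, Option.none_or]
      simp only [List.map_cons, List.map_nil]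
      by_cases hxk : (k : Int) = x
      · rw [List.find?_cons_of_pos (by simpa using hxk), if_pos (by omega)]
        rw [hxk, show x.toNat = k by omega]
      · rw [List.find?_cons_of_neg (by simpa using hxk), List.find?_nil,
           if_neg (by omega)]

theorem get?_mkMemo (xt : List (Int × List Int)) (k : Nat) (x : Int) :
    PySem.Dict.get? (mkMemo xt k) x =
      if 0 ≤ x ∧ x < (k : Int) then some (W xt x.toNat) else none := by
  show Option.map _ _ = _
  rw [show (mkMemo xt k).items = (List.range k).map (fun (j : Nat) => ((j : Int), W xt j)) from rfl,
      find?_mkMemo]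
  by_cases hx : 0 ≤ x ∧ x < (k : Int)
  · rw [if_pos hx, if_pos hx]; rfl
  · rw [if_neg hx, if_neg hx]; rfl

theorem contains_of_get?_none {d : PySem.Dict Int Int} {x : Int}
    (h : PySem.Dict.get? d x = none) : PySem.Dict.contains d x = false := by
  simp only [PySem.Dict.get?, Option.map_eq_none_iff, List.find?_eq_none] at h
  simp only [PySem.Dict.contains, List.any_eq_false]
  intro p hp
  exact h p hp

theorem insert_mkMemo (xt : List (Int × List Int)) (k : Nat) :
    PySem.Dict.insert (mkMemo xt k) (k : Int) (W xt k) = mkMemo xt (k + 1) := by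
  have hnone : PySem.Dict.get? (mkMemo xt k) (k : Int) = none := by
    rw [get?_mkMemo, if_neg (by omega)]
  rw [PySem.Dict.insert, if_neg (by rw [contains_of_get?_none hnone]; simp)]
  show PySem.Dict.mk _ = _
  rw [mkMemo, mkMemo, List.range_succ, List.map_append]
  simp

-- the memo hit: weight(i) returns memo[i] immediately
theorem wstep_hit (xt : List (Int × List Int)) (f : Nat) (i : Int)
    (memo : PySem.Dict Int Int) (v : Int) (h : PySem.Dict.get? memo i = some v) :
    wstep xt f i memo = (v, memo) := by
  unfold wstep
  rw [h]

-- one fresh call of B's weight(k) on the memo holding exactly the earlier nodes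
theorem wstep_mkMemo (xt : List (Int × List Int)) (hP : Pre_calcweights xt)
    (k : Nat) (hk : k < xt.length) (f : Nat) :
    wstep xt (f + 1) (k : Int) (mkMemo xt k) = (W xt k, mkMemo xt (k + 1)) := by
  have hnone : PySem.Dict.get? (mkMemo xt k) (k : Int) = none := by
    rw [get?_mkMemo, if_neg (by omega)]
  unfold wstep
  rw [hnone]
  have hxt := pyGetD_int_nat xt k
  rcases hP k hk with hleaf | ⟨hlen, h0a, h0b, h1a, h1b⟩
  · have hW : W xt k = 1 := Wf_leaf xt k _ (by rw [hxt, hleaf]; rfl)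
    simp only [hxt, hleaf, List.length_nil]
    rw [if_pos trivial, ← hW, insert_mkMemo]
  · have hne : ¬ (xt.getD k (0, [])).2.length = 0 := by omega
    have e0 : (xt.getD k (0, [])).2.getD 0 0
        = ((((xt.getD k (0, [])).2.getD 0 0).toNat : Nat) : Int) := by omega
    have e1 : (xt.getD k (0, [])).2.getD 1 0
        = ((((xt.getD k (0, [])).2.getD 1 0).toNat : Nat) : Int) := by omega
    simp only [hxt, (pyGetD_cs01 _).1, (pyGetD_cs01 _).2, hne, if_false]
    rw [wstep_hit xt f _ _ (W xt ((xt.getD k (0, [])).2.getD 0 0).toNat)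
          (by rw [get?_mkMemo, if_pos ⟨h0a, h0b⟩])]
    rw [wstep_hit xt f _ _ (W xt ((xt.getD k (0, [])).2.getD 1 0).toNat)
          (by rw [get?_mkMemo, if_pos ⟨h1a, h1b⟩])]
    rw [← W_eq_children xt hP k hk hne, insert_mkMemo]

-- the lookup weights[c] in A, on the weights list of the first k nodes
theorem lookup_mapW (xt : List (Int × List Int)) (k : Nat) (c : Int)
    (h1 : 0 ≤ c) (h2 : c < (k : Int)) :
    PySem.List.pyGetD ((List.range k).map (W xt)) c 0 = W xt c.toNat := by
  unfold PySem.List.pyGetD PySem.List.pyGet? PySem.List.pyIdx?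
  simp only [List.length_map, List.length_range]
  rw [if_pos h1, if_pos (by omega)]
  simp only [Option.bind_some, List.getElem?_map, List.getElem?_range (show c.toNat < k by omega),
    Option.map_some, Option.getD_some]

-- both loops, run over the first k nodes, produce the first k weights (B also the memo)
theorem loops (xt : List (Int × List Int)) (hP : Pre_calcweights xt) :
    ∀ k, k ≤ xt.length →
      ((List.range k).foldl (fun weights i =>
        let cs := (PySem.List.pyGetD xt (Int.ofNat i) (0, [])).2
        if cs.length = 0 then weights ++ [1]
        else weights ++ [PySem.List.pyGetD weights (PySem.List.pyGetD cs 0 0) 0 +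
                         PySem.List.pyGetD weights (PySem.List.pyGetD cs 1 0) 0]) []
        = (List.range k).map (W xt))
      ∧ ((List.range k).foldl (fun st i =>
          let p := wstep xt xt.length (Int.ofNat i) st.2
          (st.1 ++ [p.1], p.2)) (([] : List Int), (PySem.Dict.mk []))
        = ((List.range k).map (W xt), mkMemo xt k)) := by
  intro k
  induction k with
  | zero => intro _; exact ⟨rfl, rfl⟩
  | succ k ih =>
    intro hk1
    have hk : k < xt.length := by omega
    obtain ⟨ihA, ihB⟩ := ih (by omega)
    have hxt := pyGetD_int_nat xt k
    have hofNat : Int.ofNat k = (k : Int) := rfl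
    constructor
    · rw [List.range_succ, List.foldl_append, ihA, List.map_append, List.foldl_cons,
        List.foldl_nil, List.map_cons, List.map_nil]
      simp only [hofNat, hxt]
      rcases hP k hk with hleaf | ⟨hlen, h0a, h0b, h1a, h1b⟩
      · have hW : W xt k = 1 := Wf_leaf xt k _ (by rw [hxt, hleaf]; rfl)
        simp only [hleaf, List.length_nil]
        rw [if_pos trivial, hW]
      · have hne : ¬ (xt.getD k (0, [])).2.length = 0 := by omega
        simp only [hne, if_false, (pyGetD_cs01 _).1, (pyGetD_cs01 _).2,
          lookup_mapW xt k _ h0a h0b, lookup_mapW xt k _ h1a h1b]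
        rw [← W_eq_children xt hP k hk hne]
    · rw [List.range_succ, List.foldl_append, ihB, List.foldl_cons, List.foldl_nil,
        List.map_append, List.map_cons, List.map_nil]
      obtain ⟨m, hm⟩ : ∃ m, xt.length = m + 1 := ⟨xt.length - 1, by omega⟩
      simp only [hofNat]
      rw [hm, wstep_mkMemo xt hP k hk m]

-- ===== VERDICT (by name: the statement is the Claim_ definition above) =====
theorem calcweights_spec : Claim_equal_calcweights := by
  intro xt _ hP
  unfold Spec_calcweights calcweights calcweights_alt
  rw [(loops xt hP xt.length le_rfl).1, (loops xt hP xt.length le_rfl).2]
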